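-- pv_equiv track=rewrite | github.com/brianross93/newpookemon | beater/utils/maps.py | ascii_tile_map
-- ===== SOURCE A (Python) =====
-- from typing import List, Sequence, Tuple
--
-- Coord = Tuple[int, int]
--
-- def ascii_tile_map(
--     tile_grid: List[List[str]],
--     anchor: Coord,
--     candidates: Sequence[Coord],
--     radius: int = 5,
-- ) -> str:
--     """Return a small ASCII map centered on the player."""
--     if not tile_grid:
--         return ""
--     h = len(tile_grid)
--     w = len(tile_grid[0])
--     ar, ac = anchor
--     r0 = max(0, ar - radius)
--     r1 = min(h, ar + radius + 1)
--     c0 = max(0, ac - radius)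
--     c1 = min(w, ac + radius + 1)
--     cand_lookup: dict[Coord, str] = {}
--     for idx, coord in enumerate(candidates):
--         cand_lookup[coord] = str(idx % 10)
--     lines: List[str] = []
--     for r in range(r0, r1):
--         cells: List[str] = []
--         for c in range(c0, c1):
--             token = tile_grid[r][c].split(":", 1)[-1]
--             cell = token.split("_")[-1][-2:]
--             key = (r, c)
--             if key == anchor:
--                 cell = "P "
--             elif key in cand_lookup:
--                 cell = f"{cand_lookup[key]} "
--             cells.append(cell)
--         lines.append(" ".join(cells))
--     return "\n".join(lines)
-- ===== SOURCE B (Python) =====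
-- from typing import List, Sequence, Tuple
--
-- Coord = Tuple[int, int]
--
--
-- def _fmt(s: str) -> str:
--     token = s.split(":", 1)[-1]
--     return token.split("_")[-1][-2:]
--
--
-- def ascii_tile_map(
--     tile_grid: List[List[str]],
--     anchor: Coord,
--     candidates: Sequence[Coord],
--     radius: int = 5,
-- ) -> str:
--     """Return a small ASCII map centered on the player."""
--     if not tile_grid:
--         return ""
--     h = len(tile_grid)
--     w = len(tile_grid[0])
--     ar, ac = anchor
--     r0 = max(0, ar - radius)
--     r1 = min(h, ar + radius + 1)
--     c0 = max(0, ac - radius)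
--     c1 = min(w, ac + radius + 1)
--     # 1) render the base window, 2) stamp candidate digits (later wins),
--     # 3) stamp the player marker on top, 4) join.
--     matrix = [[_fmt(tile_grid[r][c]) for c in range(c0, c1)] for r in range(r0, r1)]
--     for idx, (cr, cc) in enumerate(candidates):
--         if r0 <= cr < r1 and c0 <= cc < c1:
--             matrix[cr - r0][cc - c0] = f"{idx % 10} "
--     if r0 <= ar < r1 and c0 <= ac < c1:
--         matrix[ar - r0][ac - c0] = "P "
--     return "\n".join(" ".join(row) for row in matrix)
-- ===== Notes on version B (the rewrite author's own statement) =====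
-- stated objective: alternative
-- what changed: A decides each cell inside the nested render loops by checking the anchor and a dict of candidate markers per cell; B first renders the whole window as a 2D matrix of base cells, then stamps candidate digits into it in one pass over enumerate(candidates) (later writes overwrite earlier ones) and finally stamps the player marker, joining at the end.
import Mathlib
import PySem

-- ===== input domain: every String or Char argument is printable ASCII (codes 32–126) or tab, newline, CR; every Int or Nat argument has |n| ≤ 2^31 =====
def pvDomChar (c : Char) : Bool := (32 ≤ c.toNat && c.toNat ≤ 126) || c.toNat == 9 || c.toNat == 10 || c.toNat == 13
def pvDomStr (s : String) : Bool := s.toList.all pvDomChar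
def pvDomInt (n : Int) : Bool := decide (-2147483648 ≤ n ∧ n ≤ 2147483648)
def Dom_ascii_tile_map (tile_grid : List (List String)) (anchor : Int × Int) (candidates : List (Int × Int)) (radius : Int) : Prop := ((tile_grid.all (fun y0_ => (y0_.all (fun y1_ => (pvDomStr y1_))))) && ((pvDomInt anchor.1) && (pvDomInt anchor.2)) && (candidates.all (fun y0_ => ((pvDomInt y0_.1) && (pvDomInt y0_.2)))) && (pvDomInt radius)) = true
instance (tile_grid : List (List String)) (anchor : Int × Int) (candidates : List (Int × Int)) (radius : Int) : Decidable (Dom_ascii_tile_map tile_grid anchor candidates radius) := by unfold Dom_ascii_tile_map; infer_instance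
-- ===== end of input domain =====

-- B renders the window as a 2D matrix of base cells, then stamps candidate digits and the
-- player marker into it (alternative decomposition, same cost); A decides each cell inline.


-- ===== PORT A =====
-- shared cell formatting: token = s.split(":", 1)[-1]; cell = token.split("_")[-1][-2:]
def pvFmtCell (s : String) : String :=
  let token := PySem.List.pyGetD ((PySem.Str.splitMax? s ":" 1).getD []) (-1) ""
  PySem.Str.slice (PySem.List.pyGetD ((PySem.Str.split? token "_").getD []) (-1) "") (some (-2)) none

def ascii_tile_map (tile_grid : List (List String)) (anchor : Int × Int) (candidates : List (Int × Int)) (radius : Int) : String :=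
  if tile_grid = [] then "" else
  let h : Int := PySem.List.len tile_grid
  let w : Int := PySem.List.len (PySem.List.pyGetD tile_grid 0 [])
  let r0 := max 0 (anchor.1 - radius)
  let r1 := min h (anchor.1 + radius + 1)
  let c0 := max 0 (anchor.2 - radius)
  let c1 := min w (anchor.2 + radius + 1)
  let cand_lookup : PySem.Dict (Int × Int) String :=
    (PySem.List.enumerate candidates).foldl
      (fun d p => d.insert p.2 (PySem.Int.toStr (PySem.Int.mod p.1 10))) PySem.Dict.empty
  let lines : List String :=
    (PySem.List.pyRange r0 r1 1).foldl (fun lines r =>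
      let cells : List String :=
        (PySem.List.pyRange c0 c1 1).foldl (fun cells c =>
          let cell := pvFmtCell (PySem.List.pyGetD (PySem.List.pyGetD tile_grid r []) c "")
          let cell := if (r, c) = anchor then "P "
            else if cand_lookup.contains (r, c) then cand_lookup.getD (r, c) "" ++ " "
            else cell
          cells ++ [cell]) []
      lines ++ [PySem.Str.join " " cells]) []
  PySem.Str.join "\n" lines

-- ===== PORT B =====
-- loop body of B's stamping pass over enumerate(candidates)
def pvStamp (r0 r1 c0 c1 : Int) (m : List (List String)) (p : Int × (Int × Int)) : List (List String) :=
  if r0 ≤ p.2.1 ∧ p.2.1 < r1 ∧ c0 ≤ p.2.2 ∧ p.2.2 < c1 then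
    PySem.List.pySetD m (p.2.1 - r0)
      (PySem.List.pySetD (PySem.List.pyGetD m (p.2.1 - r0) []) (p.2.2 - c0)
        (PySem.Int.toStr (PySem.Int.mod p.1 10) ++ " "))
  else m

def ascii_tile_map_alt (tile_grid : List (List String)) (anchor : Int × Int) (candidates : List (Int × Int)) (radius : Int) : String :=
  if tile_grid = [] then "" else
  let h : Int := PySem.List.len tile_grid
  let w : Int := PySem.List.len (PySem.List.pyGetD tile_grid 0 [])
  let r0 := max 0 (anchor.1 - radius)
  let r1 := min h (anchor.1 + radius + 1)
  let c0 := max 0 (anchor.2 - radius)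
  let c1 := min w (anchor.2 + radius + 1)
  let base : List (List String) :=
    (PySem.List.pyRange r0 r1 1).map (fun r =>
      (PySem.List.pyRange c0 c1 1).map (fun c =>
        pvFmtCell (PySem.List.pyGetD (PySem.List.pyGetD tile_grid r []) c "")))
  let stamped := (PySem.List.enumerate candidates).foldl (pvStamp r0 r1 c0 c1) base
  let final :=
    if r0 ≤ anchor.1 ∧ anchor.1 < r1 ∧ c0 ≤ anchor.2 ∧ anchor.2 < c1 then
      PySem.List.pySetD stamped (anchor.1 - r0)
        (PySem.List.pySetD (PySem.List.pyGetD stamped (anchor.1 - r0) []) (anchor.2 - c0) "P ")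
    else stamped
  PySem.Str.join "\n" (final.map (fun row => PySem.Str.join " " row))

-- ===== PRECONDITION & SPEC =====
-- Pre_ excludes exactly the ragged grids on which A raises IndexError: some row whose index
-- lies in the rendered window is shorter than the window's right column edge (the window
-- width is computed from the first row).
def Pre_ascii_tile_map (tile_grid : List (List String)) (anchor : Int × Int) (candidates : List (Int × Int)) (radius : Int) : Prop :=
  tile_grid = [] ∨
  (∀ p ∈ tile_grid.zipIdx,
     max 0 (anchor.1 - radius) ≤ (p.2 : Int) →
     (p.2 : Int) < min (tile_grid.length : Int) (anchor.1 + radius + 1) →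
     max 0 (anchor.2 - radius) < min (((tile_grid.headD []).length : Int)) (anchor.2 + radius + 1) →
     min (((tile_grid.headD []).length : Int)) (anchor.2 + radius + 1) ≤ (p.1.length : Int))
instance (tile_grid : List (List String)) (anchor : Int × Int) (candidates : List (Int × Int)) (radius : Int) : Decidable (Pre_ascii_tile_map tile_grid anchor candidates radius) := by unfold Pre_ascii_tile_map; infer_instance

def pvWitness_ascii_tile_map : List (List String) × (Int × Int) × (List (Int × Int)) × Int :=
  ([["grass:tall_ab", "rock_c"], ["x:y_z", "q"]], (0, 1), [(1, 0), (0, 0)], 1)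

def Spec_ascii_tile_map (tile_grid : List (List String)) (anchor : Int × Int) (candidates : List (Int × Int)) (radius : Int) (out : String) : Prop := out = ascii_tile_map_alt tile_grid anchor candidates radius
instance (tile_grid : List (List String)) (anchor : Int × Int) (candidates : List (Int × Int)) (radius : Int) (out : String) : Decidable (Spec_ascii_tile_map tile_grid anchor candidates radius out) := by unfold Spec_ascii_tile_map; infer_instance

-- ===== CLAIM (what is proved, stated in full; the proofs are below) =====
def Claim_equal_ascii_tile_map : Prop := ∀ (tile_grid : List (List String)) (anchor : Int × Int) (candidates : List (Int × Int)) (radius : Int), Dom_ascii_tile_map tile_grid anchor candidates radius → Pre_ascii_tile_map tile_grid anchor candidates radius → Spec_ascii_tile_map tile_grid anchor candidates radius (ascii_tile_map tile_grid anchor candidates radius)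

-- ===== LEMMAS AND PROOFS =====

-- entry of a 2D matrix (total, with defaults)
def pvE (m : List (List String)) (i j : Nat) : String := (m.getD i []).getD j ""

theorem pv_getD_set_self (m : List (List String)) (i : Nat) (hi : i < m.length) (r : List String) :
    (m.set i r).getD i [] = r := by
  rw [List.getD_eq_getElem?_getD, List.getElem?_set_self hi]; rfl

theorem pv_getD_set_self' (m : List String) (j : Nat) (hj : j < m.length) (v : String) :
    (m.set j v).getD j "" = v := by
  rw [List.getD_eq_getElem?_getD, List.getElem?_set_self hj]; rfl

theorem pv_getD_set_ne (m : List (List String)) (i i' : Nat) (h : i ≠ i') (r : List String) :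
    (m.set i r).getD i' [] = m.getD i' [] := by
  rw [List.getD_eq_getElem?_getD, List.getElem?_set_ne h, ← List.getD_eq_getElem?_getD]

theorem pv_getD_set_ne' (m : List String) (j j' : Nat) (h : j ≠ j') (v : String) :
    (m.set j v).getD j' "" = m.getD j' "" := by
  rw [List.getD_eq_getElem?_getD, List.getElem?_set_ne h, ← List.getD_eq_getElem?_getD]

theorem pvE_set_self (m : List (List String)) (i j : Nat)
    (hi : i < m.length) (hj : j < (m.getD i []).length) (v : String) :
    pvE (PySem.List.pySetD m (i : Int)
          (PySem.List.pySetD (PySem.List.pyGetD m (i : Int) []) (j : Int) v)) i j = v := by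
  simp only [pvE, PySem.List.pySetD_natCast, PySem.List.pyGetD_natCast]
  rw [pv_getD_set_self m i hi, pv_getD_set_self' _ j hj]

theorem pvE_set_ne (m : List (List String)) (i j i' j' : Nat) (v : String)
    (h : i ≠ i' ∨ j ≠ j') :
    pvE (PySem.List.pySetD m (i : Int)
          (PySem.List.pySetD (PySem.List.pyGetD m (i : Int) []) (j : Int) v)) i' j' = pvE m i' j' := by
  simp only [pvE, PySem.List.pySetD_natCast, PySem.List.pyGetD_natCast]
  rcases Nat.lt_or_ge i m.length with hi | hi
  · rcases h with h | h
    · rw [pv_getD_set_ne m i i' h]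
    · by_cases hii : i = i'
      · subst hii; rw [pv_getD_set_self m i hi, pv_getD_set_ne' _ j j' h]
      · rw [pv_getD_set_ne m i i' hii]
  · rw [List.set_eq_of_length_le hi]

-- a single two-level write preserves the shape
theorem pvSetE_shape (m : List (List String)) (a b : Int) (ha : 0 ≤ a) (v : String) :
    (PySem.List.pySetD m a (PySem.List.pySetD (PySem.List.pyGetD m a []) b v)).length = m.length ∧
    ∀ i : Nat, ((PySem.List.pySetD m a (PySem.List.pySetD (PySem.List.pyGetD m a []) b v)).getD i []).length = (m.getD i []).length := by
  rw [PySem.List.pySetD_of_nonneg _ _ ha]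
  refine ⟨by simp, fun i => ?_⟩
  rcases Nat.lt_or_ge a.toNat m.length with hlt | hge
  · by_cases hii : a.toNat = i
    · subst hii
      rw [pv_getD_set_self m _ hlt, PySem.List.length_pySetD,
          PySem.List.pyGetD_eq_getElem _ _ ha (by omega), List.getD_eq_getElem _ _ hlt]
    · rw [pv_getD_set_ne m _ i hii]
  · rw [List.set_eq_of_length_le hge]

-- one stamping step preserves the shape
theorem pvStamp_shape1 (r0 r1 c0 c1 : Int) (m : List (List String)) (p : Int × (Int × Int)) :
    (pvStamp r0 r1 c0 c1 m p).length = m.length ∧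
    ∀ i : Nat, ((pvStamp r0 r1 c0 c1 m p).getD i []).length = (m.getD i []).length := by
  unfold pvStamp
  split
  · next hg => exact pvSetE_shape m _ _ (by omega) _
  · exact ⟨rfl, fun _ => rfl⟩

-- the whole stamping pass preserves the shape
theorem pvStamp_shape (r0 r1 c0 c1 : Int) (l : List (Int × (Int × Int))) (m : List (List String)) :
    (l.foldl (pvStamp r0 r1 c0 c1) m).length = m.length ∧
    ∀ i : Nat, ((l.foldl (pvStamp r0 r1 c0 c1) m).getD i []).length = (m.getD i []).length := by
  induction l generalizing m with
  | nil => exact ⟨rfl, fun _ => rfl⟩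
  | cons p l ih =>
    simp only [List.foldl_cons]
    obtain ⟨h1, h2⟩ := ih (pvStamp r0 r1 c0 c1 m p)
    obtain ⟨g1, g2⟩ := pvStamp_shape1 r0 r1 c0 c1 m p
    exact ⟨h1.trans g1, fun i => (h2 i).trans (g2 i)⟩

-- key lemma: each entry of the stamped matrix is A's dict branch
theorem pvStamp_dict (r0 r1 c0 c1 : Int) (cs : List (Int × Int)) (m : List (List String))
    (hm : m.length = (r1 - r0).toNat)
    (hrow : ∀ i : Nat, i < m.length → (m.getD i []).length = (c1 - c0).toNat)
    (i j : Nat) (hi : i < (r1 - r0).toNat) (hj : j < (c1 - c0).toNat) :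
    pvE ((PySem.List.enumerate cs).foldl (pvStamp r0 r1 c0 c1) m) i j
      = (if ((PySem.List.enumerate cs).foldl
              (fun d p => d.insert p.2 (PySem.Int.toStr (PySem.Int.mod p.1 10)))
              (PySem.Dict.empty : PySem.Dict (Int × Int) String)).contains (r0 + i, c0 + j)
         then ((PySem.List.enumerate cs).foldl
              (fun d p => d.insert p.2 (PySem.Int.toStr (PySem.Int.mod p.1 10)))
              (PySem.Dict.empty : PySem.Dict (Int × Int) String)).getD (r0 + i, c0 + j) "" ++ " "
         else pvE m i j) := by
  induction cs using List.reverseRecOn with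
  | nil => simp [PySem.List.enumerate_nil, PySem.Dict.contains_empty]
  | append_singleton xs x ih =>
    rw [PySem.List.enumerate_append, List.foldl_append, List.foldl_append]
    simp only [PySem.List.enumerate_cons, PySem.List.enumerate_nil, List.foldl_cons, List.foldl_nil]
    set S := (PySem.List.enumerate xs).foldl (pvStamp r0 r1 c0 c1) m with hS
    set d := (PySem.List.enumerate xs).foldl
              (fun d p => d.insert p.2 (PySem.Int.toStr (PySem.Int.mod p.1 10)))
              (PySem.Dict.empty : PySem.Dict (Int × Int) String) with hd
    have hSlen : S.length = m.length := (pvStamp_shape r0 r1 c0 c1 _ m).1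
    have hSrow : ∀ k : Nat, (S.getD k []).length = (m.getD k []).length :=
      (pvStamp_shape r0 r1 c0 c1 _ m).2
    by_cases hk : ((r0 + (i : Int), c0 + (j : Int)) : Int × Int) = x
    · have hx1 : x.1 = r0 + (i : Int) := by rw [← hk]
      have hx2 : x.2 = c0 + (j : Int) := by rw [← hk]
      have hg : r0 ≤ x.1 ∧ x.1 < r1 ∧ c0 ≤ x.2 ∧ x.2 < c1 := by
        constructor; · omega
        constructor; · omega
        constructor; · omega
        · omega
      rw [pvStamp]; dsimp only
      rw [if_pos hg]
      have e1 : x.1 - r0 = ((i : Nat) : Int) := by omega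
      have e2 : x.2 - c0 = ((j : Nat) : Int) := by omega
      rw [e1, e2, pvE_set_self S i j (by omega) (by rw [hSrow i]; rw [hrow i (by omega)]; omega)]
      rw [PySem.Dict.contains_insert, PySem.Dict.getD_insert]
      have : (((r0 + (i : Int), c0 + (j : Int)) : Int × Int) == x) = true := by
        simp [hk]
      rw [this]
      simp [hk]
    · have hne : (((r0 + (i : Int), c0 + (j : Int)) : Int × Int) == x) = false := by
        simp [hk]
      rw [PySem.Dict.contains_insert, PySem.Dict.getD_insert, hne, if_neg hk, Bool.false_or]
      rw [pvStamp]; dsimp only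
      split
      · next hg =>
        have e1 : x.1 - r0 = (((x.1 - r0).toNat : Nat) : Int) := by omega
        have e2 : x.2 - c0 = (((x.2 - c0).toNat : Nat) : Int) := by omega
        rw [e1, e2, pvE_set_ne S _ _ i j _ ?hne]
        · exact ih
        · case hne =>
            by_cases h1 : (x.1 - r0).toNat = i
            · right
              intro h2
              apply hk
              have : x.1 = r0 + (i : Int) := by omega
              have : x.2 = c0 + (j : Int) := by omega
              ext <;> omega
            · exact Or.inl h1
      · exact ih

-- entries of the base matrix
theorem pvBase_entry (r0 r1 c0 c1 : Int) (g : Int → Int → String) (i j : Nat)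
    (hi : i < (r1 - r0).toNat) (hj : j < (c1 - c0).toNat) :
    pvE ((PySem.List.pyRange r0 r1 1).map (fun r => (PySem.List.pyRange c0 c1 1).map (fun c => g r c))) i j
      = g (r0 + i) (c0 + j) := by
  have hl : i < ((PySem.List.pyRange r0 r1 1).map (fun r => (PySem.List.pyRange c0 c1 1).map (fun c => g r c))).length := by
    rw [List.length_map, PySem.List.length_pyRange_one]; exact hi
  unfold pvE
  rw [List.getD_eq_getElem _ _ hl, List.getElem_map, PySem.List.getElem_pyRange_one]
  have hl2 : j < ((PySem.List.pyRange c0 c1 1).map (fun c => g (r0 + i) c)).length := by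
    rw [List.length_map, PySem.List.length_pyRange_one]; exact hj
  rw [List.getD_eq_getElem _ _ hl2, List.getElem_map, PySem.List.getElem_pyRange_one]

theorem pvBase_shape (r0 r1 c0 c1 : Int) (g : Int → Int → String) :
    (((PySem.List.pyRange r0 r1 1).map (fun r => (PySem.List.pyRange c0 c1 1).map (fun c => g r c))).length = (r1 - r0).toNat) ∧
    ∀ i : Nat, i < (r1 - r0).toNat →
      ((((PySem.List.pyRange r0 r1 1).map (fun r => (PySem.List.pyRange c0 c1 1).map (fun c => g r c))).getD i []).length = (c1 - c0).toNat) := by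
  constructor
  · rw [List.length_map, PySem.List.length_pyRange_one]
  · intro i hi
    have hl : i < ((PySem.List.pyRange r0 r1 1).map (fun r => (PySem.List.pyRange c0 c1 1).map (fun c => g r c))).length := by
      rw [List.length_map, PySem.List.length_pyRange_one]; exact hi
    rw [List.getD_eq_getElem _ _ hl, List.getElem_map, List.length_map, PySem.List.length_pyRange_one]

-- generic extensionality: a matrix with the right shape and entries IS the rendered map
theorem pvExt (M : List (List String)) (r0 r1 c0 c1 : Int) (f : Int → Int → String)
    (hlen : M.length = (r1 - r0).toNat)
    (hrow : ∀ i : Nat, i < (r1 - r0).toNat → (M.getD i []).length = (c1 - c0).toNat)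
    (hent : ∀ i j : Nat, i < (r1 - r0).toNat → j < (c1 - c0).toNat →
      pvE M i j = f (r0 + (i : Int)) (c0 + (j : Int))) :
    M = (PySem.List.pyRange r0 r1 1).map (fun r => (PySem.List.pyRange c0 c1 1).map (fun c => f r c)) := by
  apply List.ext_getElem
  · rw [hlen, List.length_map, PySem.List.length_pyRange_one]
  intro i h1 h2
  have hi : i < (r1 - r0).toNat := by rw [hlen] at h1; exact h1
  have e : M.getD i [] = M[i] := List.getD_eq_getElem _ _ h1
  rw [List.getElem_map, PySem.List.getElem_pyRange_one]
  apply List.ext_getElem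
  · rw [← e, hrow i hi, List.length_map, PySem.List.length_pyRange_one]
  intro j g1 g2
  have hj : j < (c1 - c0).toNat := by rw [← e, hrow i hi] at g1; exact g1
  rw [List.getElem_map, PySem.List.getElem_pyRange_one]
  have h := hent i j hi hj
  rw [pvE, e, List.getD_eq_getElem _ _ g1] at h
  exact h

-- the heart of the equivalence, with the window bounds generalized
theorem pvCore (r0 r1 c0 c1 : Int) (anchor : Int × Int) (cands : List (Int × Int))
    (cell : Int → Int → String) :
    (if r0 ≤ anchor.1 ∧ anchor.1 < r1 ∧ c0 ≤ anchor.2 ∧ anchor.2 < c1 then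
       PySem.List.pySetD
         (List.foldl (pvStamp r0 r1 c0 c1)
           (List.map (fun r => List.map (fun c => cell r c) (PySem.List.pyRange c0 c1 1))
             (PySem.List.pyRange r0 r1 1))
           (PySem.List.enumerate cands))
         (anchor.1 - r0)
         (PySem.List.pySetD
           (PySem.List.pyGetD
             (List.foldl (pvStamp r0 r1 c0 c1)
               (List.map (fun r => List.map (fun c => cell r c) (PySem.List.pyRange c0 c1 1))
                 (PySem.List.pyRange r0 r1 1))
               (PySem.List.enumerate cands))
             (anchor.1 - r0) [])
           (anchor.2 - c0) "P ")
     else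
       List.foldl (pvStamp r0 r1 c0 c1)
         (List.map (fun r => List.map (fun c => cell r c) (PySem.List.pyRange c0 c1 1))
           (PySem.List.pyRange r0 r1 1))
         (PySem.List.enumerate cands))
    = List.map (fun r =>
        List.map (fun c =>
          if (r, c) = anchor then "P "
          else
            if (List.foldl (fun d p => d.insert p.2 (PySem.Int.toStr (PySem.Int.mod p.1 10)))
                  (PySem.Dict.empty : PySem.Dict (Int × Int) String)
                  (PySem.List.enumerate cands)).contains (r, c) = true then
              (List.foldl (fun d p => d.insert p.2 (PySem.Int.toStr (PySem.Int.mod p.1 10)))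
                  (PySem.Dict.empty : PySem.Dict (Int × Int) String)
                  (PySem.List.enumerate cands)).getD (r, c) "" ++ " "
            else cell r c)
          (PySem.List.pyRange c0 c1 1))
        (PySem.List.pyRange r0 r1 1) := by
  set base := List.map (fun r => List.map (fun c => cell r c) (PySem.List.pyRange c0 c1 1))
      (PySem.List.pyRange r0 r1 1) with hbase
  set S := List.foldl (pvStamp r0 r1 c0 c1) base (PySem.List.enumerate cands) with hSdef
  obtain ⟨hblen, hbrow⟩ := pvBase_shape r0 r1 c0 c1 (fun r c => cell r c)
  have hSlen : S.length = (r1 - r0).toNat := by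
    rw [hSdef, (pvStamp_shape r0 r1 c0 c1 _ base).1, hblen]
  have hSrow : ∀ i : Nat, i < (r1 - r0).toNat → (S.getD i []).length = (c1 - c0).toNat := by
    intro i hi
    rw [hSdef, (pvStamp_shape r0 r1 c0 c1 _ base).2 i, hbrow i hi]
  have hSdict : ∀ i j : Nat, i < (r1 - r0).toNat → j < (c1 - c0).toNat →
      pvE S i j =
        (if (List.foldl (fun d p => d.insert p.2 (PySem.Int.toStr (PySem.Int.mod p.1 10)))
              (PySem.Dict.empty : PySem.Dict (Int × Int) String)
              (PySem.List.enumerate cands)).contains (r0 + (i : Int), c0 + (j : Int)) = true then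
           (List.foldl (fun d p => d.insert p.2 (PySem.Int.toStr (PySem.Int.mod p.1 10)))
              (PySem.Dict.empty : PySem.Dict (Int × Int) String)
              (PySem.List.enumerate cands)).getD (r0 + (i : Int), c0 + (j : Int)) "" ++ " "
         else cell (r0 + (i : Int)) (c0 + (j : Int))) := by
    intro i j hi hj
    have hblen' : base.length = (r1 - r0).toNat := hblen
    rw [hSdef, pvStamp_dict r0 r1 c0 c1 cands base hblen' (fun k hk => hbrow k (by omega)) i j hi hj]
    rw [pvBase_entry r0 r1 c0 c1 (fun r c => cell r c) i j hi hj]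
  -- shape of the left-hand side matrix
  have hMlen : (if r0 ≤ anchor.1 ∧ anchor.1 < r1 ∧ c0 ≤ anchor.2 ∧ anchor.2 < c1 then
       PySem.List.pySetD S (anchor.1 - r0)
         (PySem.List.pySetD (PySem.List.pyGetD S (anchor.1 - r0) []) (anchor.2 - c0) "P ")
     else S).length = (r1 - r0).toNat := by
    split
    · next hga => rw [(pvSetE_shape S (anchor.1 - r0) (anchor.2 - c0) (by omega) "P ").1, hSlen]
    · exact hSlen
  have hMrow : ∀ i : Nat, i < (r1 - r0).toNat →
      ((if r0 ≤ anchor.1 ∧ anchor.1 < r1 ∧ c0 ≤ anchor.2 ∧ anchor.2 < c1 then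
       PySem.List.pySetD S (anchor.1 - r0)
         (PySem.List.pySetD (PySem.List.pyGetD S (anchor.1 - r0) []) (anchor.2 - c0) "P ")
     else S).getD i []).length = (c1 - c0).toNat := by
    intro i hi
    split
    · next hga =>
      rw [(pvSetE_shape S (anchor.1 - r0) (anchor.2 - c0) (by omega) "P ").2 i, hSrow i hi]
    · exact hSrow i hi
  have hMent : ∀ i j : Nat, i < (r1 - r0).toNat → j < (c1 - c0).toNat →
      pvE (if r0 ≤ anchor.1 ∧ anchor.1 < r1 ∧ c0 ≤ anchor.2 ∧ anchor.2 < c1 then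
       PySem.List.pySetD S (anchor.1 - r0)
         (PySem.List.pySetD (PySem.List.pyGetD S (anchor.1 - r0) []) (anchor.2 - c0) "P ")
     else S) i j =
      (if ((r0 + (i : Int), c0 + (j : Int)) : Int × Int) = anchor then "P "
       else
         if (List.foldl (fun d p => d.insert p.2 (PySem.Int.toStr (PySem.Int.mod p.1 10)))
               (PySem.Dict.empty : PySem.Dict (Int × Int) String)
               (PySem.List.enumerate cands)).contains (r0 + (i : Int), c0 + (j : Int)) = true then
           (List.foldl (fun d p => d.insert p.2 (PySem.Int.toStr (PySem.Int.mod p.1 10)))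
               (PySem.Dict.empty : PySem.Dict (Int × Int) String)
               (PySem.List.enumerate cands)).getD (r0 + (i : Int), c0 + (j : Int)) "" ++ " "
         else cell (r0 + (i : Int)) (c0 + (j : Int))) := by
    intro i j hi hj
    by_cases hga : r0 ≤ anchor.1 ∧ anchor.1 < r1 ∧ c0 ≤ anchor.2 ∧ anchor.2 < c1
    · rw [if_pos hga]
      by_cases hanc : ((r0 + (i : Int), c0 + (j : Int)) : Int × Int) = anchor
      · have ha1 : anchor.1 = r0 + (i : Int) := by rw [← hanc]
        have ha2 : anchor.2 = c0 + (j : Int) := by rw [← hanc]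
        have e1 : anchor.1 - r0 = ((i : Nat) : Int) := by omega
        have e2 : anchor.2 - c0 = ((j : Nat) : Int) := by omega
        rw [e1, e2, pvE_set_self S i j (by omega) (by rw [hSrow i hi]; omega), if_pos hanc]
      · have e1 : anchor.1 - r0 = (((anchor.1 - r0).toNat : Nat) : Int) := by omega
        have e2 : anchor.2 - c0 = (((anchor.2 - c0).toNat : Nat) : Int) := by omega
        rw [e1, e2, pvE_set_ne S _ _ i j _ ?hx, hSdict i j hi hj, if_neg hanc]
        case hx =>
          by_cases h1 : (anchor.1 - r0).toNat = i
          · right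
            intro h2
            apply hanc
            ext <;> omega
          · exact Or.inl h1
    · rw [if_neg hga]
      have hanc : ¬ (((r0 + (i : Int), c0 + (j : Int)) : Int × Int) = anchor) := by
        intro h
        apply hga
        have h1 : anchor.1 = r0 + (i : Int) := by rw [← h]
        have h2 : anchor.2 = c0 + (j : Int) := by rw [← h]
        refine ⟨by omega, by omega, by omega, by omega⟩
      rw [hSdict i j hi hj, if_neg hanc]
  exact pvExt _ r0 r1 c0 c1 _ hMlen hMrow hMent

-- ===== VERDICT (by name: the statement is the Claim_ definition above) =====
theorem ascii_tile_map_spec : Claim_equal_ascii_tile_map := by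
  intro tile_grid anchor candidates radius _hdom _hpre
  unfold Spec_ascii_tile_map ascii_tile_map ascii_tile_map_alt
  by_cases hg : tile_grid = []
  · rw [if_pos hg, if_pos hg]
  rw [if_neg hg, if_neg hg]
  simp only [PySem.List.foldl_append_singleton_eq_map, List.nil_append]
  rw [pvCore (max 0 (anchor.1 - radius)) (min (PySem.List.len tile_grid) (anchor.1 + radius + 1))
      (max 0 (anchor.2 - radius)) (min (PySem.List.len (PySem.List.pyGetD tile_grid 0 [])) (anchor.2 + radius + 1))
      anchor candidates
      (fun r c => pvFmtCell (PySem.List.pyGetD (PySem.List.pyGetD tile_grid r []) c ""))]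
  rw [List.map_map]
  rfl
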